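-- pv_equiv track=rewrite | github.com/awblocker/proteomeDB | src/setupDatabase.py | parseSqlToCmds
-- ===== SOURCE A (Python) =====
-- def parseSqlToCmds(sqlTxt):
--     '''
--     Function parse SQL text (as list of lines) into commands.
--
--     Removes comment-only lines and splits based upon semicolons.
--
--     Returns list of command strings.
--     '''
--     # Remove comments
--     sqlTxt = [line.strip('\n\r') for line in sqlTxt if line[0:2]!='--']
--     sqlTxt = [line.split('--')[0] for line in sqlTxt]
--
--     # Merge into a single string
--     sqlTxt = ''.join(sqlTxt)
--
--     # Split into commands based upon semicolons
--     sqlCmds = sqlTxt.split(';')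
--     sqlCmds = [s for s in sqlCmds if len(s) > 0]
--
--     # Add semicolons back to end of commands
--     sqlCmds = [s + ';' for s in sqlCmds]
--
--     return(sqlCmds)
-- ===== SOURCE B (Python) =====
-- def parseSqlToCmds(sqlTxt):
--     '''
--     Function parse SQL text (as list of lines) into commands.
--
--     Removes comment-only lines and splits based upon semicolons.
--
--     Returns list of command strings.
--     '''
--     cmds = []
--     buf = []
--     for line in sqlTxt:
--         if line[0:2] == '--':
--             continue
--         for ch in line.strip('\n\r').split('--', 1)[0]:
--             if ch == ';':
--                 if buf:
--                     buf.append(';')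
--                     cmds.append(''.join(buf))
--                 buf = []
--             else:
--                 buf.append(ch)
--     if buf:
--         buf.append(';')
--         cmds.append(''.join(buf))
--     return cmds
-- ===== Notes on version B (the rewrite author's own statement) =====
-- stated objective: alternative
-- what changed: A builds intermediate lists, joins everything into one big string and then splits/filters/maps it in separate batch passes; B makes a single streaming pass over the lines and characters, maintaining a running command buffer and emitting each command as soon as its ';' is seen.
import Mathlib
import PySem

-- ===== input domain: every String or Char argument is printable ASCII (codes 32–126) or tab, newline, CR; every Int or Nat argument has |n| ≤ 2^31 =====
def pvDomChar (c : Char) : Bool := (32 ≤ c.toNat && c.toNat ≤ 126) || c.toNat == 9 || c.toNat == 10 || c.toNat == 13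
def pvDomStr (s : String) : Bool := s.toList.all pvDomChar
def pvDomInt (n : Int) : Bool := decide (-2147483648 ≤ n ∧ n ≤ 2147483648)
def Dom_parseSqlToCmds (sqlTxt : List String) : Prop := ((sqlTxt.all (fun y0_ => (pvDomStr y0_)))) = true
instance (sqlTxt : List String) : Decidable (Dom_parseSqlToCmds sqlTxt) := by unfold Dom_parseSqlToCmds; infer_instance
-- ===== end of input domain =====

-- B replaces A's batch pipeline (join all lines into one string, then split/filter/map) by a single
-- streaming pass over the characters that maintains a running command buffer; same return value.

-- ===== PORT A =====
def parseSqlToCmds (sqlTxt : List String) : List String :=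
  -- sqlCmds = ''.join([line.strip('\n\r') for line in sqlTxt if line[0:2] != '--']
  --                   mapped through line.split('--')[0]).split(';')
  -- (split('--') always yields ≥ 1 piece, so the '[0]' never raises; split? is some since '--', ';' ≠ '')
  (((PySem.Str.split?
      (PySem.Str.join ""
        (((sqlTxt.filter (fun line => !(PySem.Str.slice line (some 0) (some 2) == "--"))).map
            (fun line => PySem.Str.stripChars line "\n\r")).map
          (fun line => ((PySem.Str.split? line "--").getD []).headD "")))
      ";").getD []).filter
    -- [s for s in sqlCmds if len(s) > 0]
    (fun s => decide ((0:Int) < PySem.Str.len s))).map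
    -- [s + ';' for s in sqlCmds]
    (fun s => s ++ ";")

-- ===== PORT B =====
-- one character of the streaming pass: on ';' flush the buffer (if non-empty) as a command, else extend it
def pvStep (st : List String × List Char) (c : Char) : List String × List Char :=
  if c = ';' then
    (if st.2.isEmpty then st.1 else st.1 ++ [String.ofList (st.2 ++ [';'])], [])
  else (st.1, st.2 ++ [c])

-- the final 'if buf: cmds.append(''.join(buf) + ';')'
def pvFlush (st : List String × List Char) : List String :=
  if st.2.isEmpty then st.1 else st.1 ++ [String.ofList (st.2 ++ [';'])]

def parseSqlToCmds_alt (sqlTxt : List String) : List String :=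
  pvFlush (sqlTxt.foldl (fun st line =>
      if PySem.Str.slice line (some 0) (some 2) == "--" then st   -- continue
      else ((((PySem.Str.split? (PySem.Str.stripChars line "\n\r") "--").getD []).headD "").toList).foldl pvStep st)
    ([], []))

-- ===== PRECONDITION & SPEC =====
def Spec_parseSqlToCmds (sqlTxt : List String) (out : List String) : Prop := out = parseSqlToCmds_alt sqlTxt
instance (sqlTxt : List String) (out : List String) : Decidable (Spec_parseSqlToCmds sqlTxt out) := by unfold Spec_parseSqlToCmds; infer_instance

-- ===== CLAIM (what is proved, stated in full; the proofs are below) =====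
def Claim_equal_parseSqlToCmds : Prop := ∀ (sqlTxt : List String), Dom_parseSqlToCmds sqlTxt → Spec_parseSqlToCmds sqlTxt (parseSqlToCmds sqlTxt)

-- ===== LEMMAS AND PROOFS =====

-- the character stream a line contributes: strip '\n\r', keep the part before '--'
def pvClean (cs : List Char) : List Char :=
  ((PySem.Chars.split? (PySem.Chars.stripChars cs ['\n','\r']) ['-','-']).getD []).headD []

-- all characters the non-comment lines contribute, in order
def pvKept (sqlTxt : List String) : List Char :=
  ((sqlTxt.filter (fun line => !(PySem.Str.slice line (some 0) (some 2) == "--"))).map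
    (fun line => pvClean line.toList)).flatten

-- splitting a char stream on ';' with an open segment `cur`
def pvSplit (cur : List Char) : List Char → List (List Char)
  | [] => [cur]
  | c :: cs => if c = ';' then cur :: pvSplit [] cs else pvSplit (cur ++ [c]) cs

-- the commands emitted from a char stream given the current buffer
def pvEmit (buf : List Char) : List Char → List String
  | [] => if buf.isEmpty then [] else [String.ofList buf ++ ";"]
  | c :: cs => if c = ';' then
      (if buf.isEmpty then pvEmit [] cs else (String.ofList buf ++ ";") :: pvEmit [] cs)
    else pvEmit (buf ++ [c]) cs

lemma pvClean_toList (line : String) :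
    (((PySem.Str.split? (PySem.Str.stripChars line "\n\r") "--").getD []).headD "").toList
      = pvClean line.toList := by
  have h := PySem.Str.split?_map (PySem.Str.stripChars line "\n\r") "--"
  rw [PySem.Str.toList_stripChars] at h
  unfold pvClean
  cases hs : PySem.Str.split? (PySem.Str.stripChars line "\n\r") "--" with
  | none =>
      rw [hs] at h; simp at h
      rw [← h]; simp
  | some l =>
      rw [hs] at h; simp at h
      rw [← h]; cases l <;> simp

lemma pvJoin_nil (parts : List (List Char)) : PySem.Chars.join [] parts = parts.flatten := by
  induction parts with
  | nil => rfl
  | cons h t ih => cases t <;> simp_all [PySem.Chars.join, List.intercalate, List.intersperse, List.flatten]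

lemma pvSemi_ofList (l : List Char) : String.ofList (l ++ [';']) = String.ofList l ++ ";" := by
  rw [String.ofList_append]

lemma pvConsSemi_ofList (c : Char) (l : List Char) :
    String.ofList (c :: (l ++ [';'])) = String.ofList (c :: l) ++ ";" := by
  rw [← List.cons_append]; exact pvSemi_ofList (c :: l)

lemma pvGo_eq (fuel : Nat) : ∀ (l cur : List Char) (acc : List (List Char)), l.length < fuel →
    PySem.Chars.splitOn.go [';'] fuel l cur acc = acc.reverse ++ pvSplit cur.reverse l := by
  induction fuel with
  | zero => intro l cur acc h; omega
  | succ f ih =>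
    intro l cur acc h
    cases l with
    | nil => rw [PySem.Chars.splitOn.go.eq_def]; simp [pvSplit]
    | cons c rest =>
      rw [PySem.Chars.splitOn.go.eq_def]
      by_cases hc : c = ';'
      · subst hc
        have hp : [';'].isPrefixOf (';' :: rest) = true := by simp [List.isPrefixOf]
        simp only [hp, if_pos]
        have hd : List.drop [';'].length (';' :: rest) = rest := rfl
        rw [hd, ih rest [] (cur.reverse :: acc) (by simpa using Nat.lt_of_succ_lt_succ h)]
        simp [pvSplit]
      · have hp : [';'].isPrefixOf (c :: rest) = false := by
          simp [List.isPrefixOf]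
          intro hco; exact absurd hco.symm hc
        simp only [hp, Bool.false_eq_true, if_false]
        rw [ih rest (c :: cur) acc (by simpa using Nat.lt_of_succ_lt_succ h)]
        simp [pvSplit, hc]

lemma pvSplitOn_eq (s : List Char) : PySem.Chars.splitOn s [';'] = pvSplit [] s := by
  have := pvGo_eq (s.length + 1) s [] [] (by omega)
  simpa [PySem.Chars.splitOn] using this

lemma pvSplit_emit (cs : List Char) : ∀ (buf : List Char),
    ((pvSplit buf cs).filter (fun p => decide (0 < p.length))).map (fun p => String.ofList p ++ ";")
      = pvEmit buf cs := by
  induction cs with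
  | nil => intro buf; cases buf <;> simp [pvSplit, pvEmit]
  | cons c rest ih =>
    intro buf
    by_cases hc : c = ';'
    · subst hc
      cases buf <;> simp [pvSplit, pvEmit, ih]
    · simp [pvSplit, pvEmit, hc, ih]

lemma pvFold_emit (cs : List Char) : ∀ (out : List String) (buf : List Char),
    pvFlush (cs.foldl pvStep (out, buf)) = out ++ pvEmit buf cs := by
  induction cs with
  | nil => intro out buf; cases buf <;> simp [pvEmit, pvFlush, pvConsSemi_ofList]
  | cons c rest ih =>
    intro out buf
    by_cases hc : c = ';'
    · subst hc
      cases buf <;> simp [List.foldl_cons, pvStep, pvEmit, ih, pvConsSemi_ofList]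
    · simp [List.foldl_cons, pvStep, pvEmit, hc, ih]

lemma pvLines_fold (lines : List String) : ∀ (st : List String × List Char),
    lines.foldl (fun st line =>
      if PySem.Str.slice line (some 0) (some 2) == "--" then st
      else ((((PySem.Str.split? (PySem.Str.stripChars line "\n\r") "--").getD []).headD "").toList).foldl pvStep st) st
      = (pvKept lines).foldl pvStep st := by
  induction lines with
  | nil => intro st; simp [pvKept]
  | cons l rest ih =>
    intro st
    by_cases hl : PySem.Str.slice l (some 0) (some 2) == "--"
    · have hk : pvKept (l :: rest) = pvKept rest := by simp [pvKept, List.filter, hl]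
      simp only [List.foldl_cons, hl, if_pos, ih, hk]
    · have hk : pvKept (l :: rest) = pvClean l.toList ++ pvKept rest := by
        simp [pvKept, List.filter, hl]
      simp only [List.foldl_cons, hl, if_neg, Bool.false_eq_true, not_false_iff, ih, hk]
      rw [pvClean_toList, List.foldl_append]

-- A's string pipeline, pushed down to the character level
lemma pvA_chars (sqlTxt : List String) :
    parseSqlToCmds sqlTxt
      = ((pvSplit [] (pvKept sqlTxt)).filter (fun p => decide (0 < p.length))).map
          (fun p => String.ofList p ++ ";") := by
  unfold parseSqlToCmds
  set t2 := ((sqlTxt.filter (fun line => !(PySem.Str.slice line (some 0) (some 2) == "--"))).map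
      (fun line => PySem.Str.stripChars line "\n\r")).map
      (fun line => ((PySem.Str.split? line "--").getD []).headD "") with ht2
  have hjoin : (PySem.Str.join "" t2).toList = pvKept sqlTxt := by
    rw [PySem.Str.toList_join]
    have he : ("" : String).toList = [] := rfl
    rw [he, pvJoin_nil, ht2]
    simp only [pvKept, List.map_map]
    refine congrArg List.flatten (List.map_congr_left ?_)
    intro line _
    simp only [Function.comp_apply]
    exact pvClean_toList line
  have hsem : (";" : String).toList = [';'] := rfl
  have h := PySem.Str.split?_map (PySem.Str.join "" t2) ";"
  rw [hsem, hjoin] at h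
  have hch : PySem.Chars.split? (pvKept sqlTxt) [';'] = some (pvSplit [] (pvKept sqlTxt)) := by
    simp [PySem.Chars.split?, pvSplitOn_eq]
  rw [hch] at h
  cases hs : PySem.Str.split? (PySem.Str.join "" t2) ";" with
  | none => rw [hs] at h; simp at h
  | some l =>
      rw [hs] at h
      simp only [Option.map_some, Option.some.injEq] at h
      simp only [Option.getD_some]
      have hl : l = (pvSplit [] (pvKept sqlTxt)).map String.ofList := by
        rw [← h, List.map_map]
        simp [Function.comp_def, String.ofList_toList]
      rw [hl, List.filter_map, List.map_map]
      have hf : ((fun s => decide ((0:Int) < PySem.Str.len s)) ∘ String.ofList)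
          = (fun p : List Char => decide (0 < p.length)) := by
        funext p
        simp [Function.comp_apply, PySem.Str.len_eq]
      have hg : ((fun s => s ++ (";" : String)) ∘ String.ofList)
          = (fun p : List Char => String.ofList p ++ ";") := by
        funext p
        simp [Function.comp_apply]
      rw [hf, hg]

-- ===== VERDICT (by name: the statement is the Claim_ definition above) =====
theorem parseSqlToCmds_spec : Claim_equal_parseSqlToCmds := by
  intro sqlTxt _
  unfold Spec_parseSqlToCmds
  rw [pvA_chars, pvSplit_emit]
  unfold parseSqlToCmds_alt
  rw [pvLines_fold]
  exact (pvFold_emit (pvKept sqlTxt) [] []).symm
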